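-- pv_equiv track=rewrite | github.com/koreyoshi-mln/simple_captcha_inference_logon_demo_malina | src/captcha/spliter/spliter.py | compute_cutline
-- ===== SOURCE A (Python) =====
-- def compute_cutline(projection, only_one=False):
--     "x0, x1 all included"
--     state='start'
--     break_pos = []
--     x0=None
--     x1=None
--     zero_count=0
--
--     for i,n in enumerate(projection):
--
--         if state == 'start':
--             if n == 0:
--                 state = 'zero'
--             else:
--                 state = 'none-zero'
--                 x0 = i
--
--         elif state == 'zero':
--             if n != 0:
--                 state = 'none-zero'
--                 x0 = i
--
--         elif state == 'none-zero':
--             if n == 0: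
--                 state = 'zero'
--                 x1 = i
--                 break_pos.append((x0, x1))
--
--
--     if only_one and len(break_pos)>1:
--         break_pos = [(break_pos[0][0], break_pos[-1][1])]
--
--     return break_pos
-- ===== SOURCE B (Python) =====
-- def compute_cutline(projection, only_one=False):
--     "x0, x1 all included"
--     # A run-boundary formulation: a cut starts where a non-zero follows a zero
--     # (with a virtual zero before index 0) and ends where a zero follows a
--     # non-zero; zip pairs them up, dropping an unterminated final run.
--     prevs = [0] + projection[:-1]
--     pairs = list(enumerate(zip(prevs, projection)))
--     starts = [i for i, (prev, cur) in pairs if cur != 0 and prev == 0]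
--     ends = [i for i, (prev, cur) in pairs if cur == 0 and prev != 0]
--     break_pos = list(zip(starts, ends))
--     if only_one and len(break_pos) > 1:
--         break_pos = [(break_pos[0][0], break_pos[-1][1])]
--     return break_pos
-- ===== Notes on version B (the rewrite author's own statement) =====
-- stated objective: idiomatic
-- what changed: Replaces A's three-state machine (state string, x0/x1 registers, in-loop append) with a declarative run-boundary pass: pair each element with its predecessor (virtual zero before index 0), filter the run-start and run-end indices with two comprehensions, and zip them up, which drops an unterminated final run exactly as A does.
import Mathlib
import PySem

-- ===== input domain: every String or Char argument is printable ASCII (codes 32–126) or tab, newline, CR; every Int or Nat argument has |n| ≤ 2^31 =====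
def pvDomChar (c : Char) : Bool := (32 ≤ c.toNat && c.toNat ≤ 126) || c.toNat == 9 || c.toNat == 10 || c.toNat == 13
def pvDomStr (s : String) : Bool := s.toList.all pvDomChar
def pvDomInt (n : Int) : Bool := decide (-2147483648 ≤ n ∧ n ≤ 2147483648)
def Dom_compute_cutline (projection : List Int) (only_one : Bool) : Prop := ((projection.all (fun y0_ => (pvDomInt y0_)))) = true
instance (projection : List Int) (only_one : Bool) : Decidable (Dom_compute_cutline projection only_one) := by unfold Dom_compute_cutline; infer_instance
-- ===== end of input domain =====

-- B replaces A's explicit three-state machine by a declarative run-boundary pass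
-- (filter start/end boundaries, zip them up); objective: simpler/idiomatic, same cost.

-- ===== PORT A =====
-- one iteration of A's for-loop: state is (state-string, break_pos, x0, x1);
-- x0/x1 are Option Int (Python initialises them to None); the append (x0, x1)
-- uses .getD 0, which is only reached with x0 = some _ (state "none-zero").
def pvAStep (st : String × List (Int × Int) × Option Int × Option Int) (p : Int × Int) :
    String × List (Int × Int) × Option Int × Option Int :=
  let (state, break_pos, x0, x1) := st
  let (i, n) := p
  if state == "start" then
    if n == 0 then ("zero", break_pos, x0, x1)
    else ("none-zero", break_pos, some i, x1)
  else if state == "zero" then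
    if n != 0 then ("none-zero", break_pos, some i, x1)
    else st
  else if state == "none-zero" then
    if n == 0 then ("zero", break_pos ++ [(x0.getD 0, i)], x0, some i)
    else st
  else st

def compute_cutline (projection : List Int) (only_one : Bool) : List (Int × Int) :=
  let r := (PySem.List.enumerate projection).foldl pvAStep ("start", [], none, none)
  let break_pos := r.2.1
  -- break_pos[0] / break_pos[-1]: in range since len(break_pos) > 1 on this branch
  if only_one && decide (break_pos.length > 1) then
    [((PySem.List.pyGetD break_pos 0 (0, 0)).1, (PySem.List.pyGetD break_pos (-1) (0, 0)).2)]
  else break_pos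

-- ===== PORT B =====
def compute_cutline_alt (projection : List Int) (only_one : Bool) : List (Int × Int) :=
  let prevs := 0 :: PySem.List.slice projection none (some (-1))
  let pairs := PySem.List.enumerate (prevs.zip projection)
  let starts := (pairs.filter (fun p => p.2.2 != 0 && p.2.1 == 0)).map (·.1)
  let ends := (pairs.filter (fun p => p.2.2 == 0 && p.2.1 != 0)).map (·.1)
  let break_pos := starts.zip ends
  -- break_pos[0] / break_pos[-1]: in range since len(break_pos) > 1 on this branch
  if only_one && decide (break_pos.length > 1) then
    [((PySem.List.pyGetD break_pos 0 (0, 0)).1, (PySem.List.pyGetD break_pos (-1) (0, 0)).2)]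
  else break_pos

-- ===== PRECONDITION & SPEC =====
def Spec_compute_cutline (projection : List Int) (only_one : Bool) (out : List (Int × Int)) : Prop := out = compute_cutline_alt projection only_one
instance (projection : List Int) (only_one : Bool) (out : List (Int × Int)) : Decidable (Spec_compute_cutline projection only_one out) := by unfold Spec_compute_cutline; infer_instance

-- ===== CLAIM (what is proved, stated in full; the proofs are below) =====
def Claim_equal_compute_cutline : Prop := ∀ (projection : List Int) (only_one : Bool), Dom_compute_cutline projection only_one → Spec_compute_cutline projection only_one (compute_cutline projection only_one)

-- ===== LEMMAS AND PROOFS =====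

-- reference recursions for A's state machine (proof-only)
mutual
def pvRunZ : List Int → Int → List (Int × Int)
  | [], _ => []
  | x :: xs, i => if x = 0 then pvRunZ xs (i + 1) else pvRunN xs (i + 1) i
def pvRunN : List Int → Int → Int → List (Int × Int)
  | [], _, _ => []
  | x :: xs, i, x0 => if x = 0 then (x0, i) :: pvRunZ xs (i + 1) else pvRunN xs (i + 1) x0
end

theorem pvBridge (xs : List Int) : ∀ (i : Int) (acc : List (Int × Int)) (x1 : Option Int),
    (((PySem.List.enumerate xs i).foldl pvAStep ("start", acc, none, x1)).2.1 = acc ++ pvRunZ xs i)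
    ∧ (∀ x0 : Option Int, ((PySem.List.enumerate xs i).foldl pvAStep ("zero", acc, x0, x1)).2.1 = acc ++ pvRunZ xs i)
    ∧ (∀ x0 : Int, ((PySem.List.enumerate xs i).foldl pvAStep ("none-zero", acc, some x0, x1)).2.1
        = acc ++ pvRunN xs i x0) := by
  induction xs with
  | nil => intro i acc x1; simp [PySem.List.enumerate_nil, pvRunZ, pvRunN]
  | cons x xs ih =>
    intro i acc x1
    refine ⟨?_, fun x0 => ?_, fun x0 => ?_⟩ <;>
      · rw [PySem.List.enumerate_cons]
        by_cases hx : x = 0 <;>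
          simp [List.foldl_cons, pvAStep, hx, pvRunZ, pvRunN, ih]

-- the boundary view of A's recursions, generalized over the previous element
theorem pvMain (xs : List Int) : ∀ (i prev : Int),
    (prev = 0 → pvRunZ xs i =
      (((PySem.List.enumerate ((prev :: xs.dropLast).zip xs) i).filter
          (fun p => p.2.2 != 0 && p.2.1 == 0)).map (·.1)).zip
      (((PySem.List.enumerate ((prev :: xs.dropLast).zip xs) i).filter
          (fun p => p.2.2 == 0 && p.2.1 != 0)).map (·.1)))
    ∧ (∀ x0 : Int, prev ≠ 0 → pvRunN xs i x0 =
      (x0 :: (((PySem.List.enumerate ((prev :: xs.dropLast).zip xs) i).filter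
          (fun p => p.2.2 != 0 && p.2.1 == 0)).map (·.1))).zip
      (((PySem.List.enumerate ((prev :: xs.dropLast).zip xs) i).filter
          (fun p => p.2.2 == 0 && p.2.1 != 0)).map (·.1))) := by
  induction xs with
  | nil => intro i prev; simp [PySem.List.enumerate_nil, pvRunZ, pvRunN]
  | cons x xs ih =>
    intro i prev
    have hz : (prev :: (x :: xs).dropLast).zip (x :: xs)
        = (prev, x) :: ((x :: xs.dropLast).zip xs) := by
      cases xs <;> simp
    constructor
    · intro hp; subst hp
      rw [pvRunZ, hz, PySem.List.enumerate_cons]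
      by_cases hx : x = 0
      · simp only [hx, List.filter_cons]
        simpa using (ih (i + 1) 0).1 rfl
      · simp only [List.filter_cons]
        have := (ih (i + 1) x).2 i hx
        simp [hx] at this ⊢
        simpa using this
    · intro x0 hprev
      rw [pvRunN, hz, PySem.List.enumerate_cons]
      by_cases hx : x = 0
      · simp only [hx, List.filter_cons]
        have := (ih (i + 1) 0).1 rfl
        simp [hprev] at this ⊢
        simpa using this
      · simp only [List.filter_cons]
        have := (ih (i + 1) x).2 x0 hx
        simp [hx, hprev] at this ⊢
        simpa using this

-- ===== VERDICT (by name: the statement is the Claim_ definition above) =====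
theorem compute_cutline_spec : Claim_equal_compute_cutline := by
  intro projection only_one _
  unfold Spec_compute_cutline compute_cutline compute_cutline_alt
  rw [PySem.List.slice_to_neg_one]
  have h1 : (((PySem.List.enumerate projection 0).foldl pvAStep ("start", [], none, none)).2.1 : List (Int × Int))
      = pvRunZ projection 0 := by
    simpa using (pvBridge projection 0 [] none).1
  have h2 := (pvMain projection 0 0).1 rfl
  simp only [h1, h2]
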